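-- pv_equiv track=rewrite | github.com/PittYHL/Elastic_MBQC | gate_blocks.py | cal_utilization
-- ===== SOURCE A (Python) =====
-- def cal_utilization(map, qubits):
--     redundancy = 0
--     for i in range(qubits):
--         end = 1
--         while(end < len(map[0])):
--             if (map[i*2][end-1] == map[i*2][end] == 'X'):
--                 redundancy = redundancy + 2
--                 end = end + 2
--             else:
--                 end = end + 1
--     for i in range(qubits*2 - 1):
--         end = 0
--         while(end < len(map[0])):
--             if (map[i][end] == 'Z'):
--                 end = end + 1
--                 redundancy = redundancy + 1
--             else:
--                 end = end + 1
--     return redundancy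
-- ===== SOURCE B (Python) =====
-- from itertools import groupby
--
-- def cal_utilization(map, qubits):
--     if qubits <= 0:
--         return 0
--     w = len(map[0])
--     if w == 0:
--         return 0
--     redundancy = 0
--     for i in range(qubits):
--         for key, grp in groupby(map[i * 2][:w]):
--             if key == 'X':
--                 run = sum(1 for _ in grp)
--                 redundancy += 2 * (run // 2)
--     redundancy += sum(1 for i in range(2 * qubits - 1)
--                         for cell in map[i][:w] if cell == 'Z')
--     return redundancy
-- ===== Notes on version B (the rewrite author's own statement) =====
-- stated objective: simpler
-- what changed: Replaces A's index-stepping greedy while-loop over cell pairs by an itertools.groupby run-length pass adding 2*(run//2) per maximal X-run, and A's Z-counting while-loop by a direct sum over the sliced rows.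
import Mathlib
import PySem

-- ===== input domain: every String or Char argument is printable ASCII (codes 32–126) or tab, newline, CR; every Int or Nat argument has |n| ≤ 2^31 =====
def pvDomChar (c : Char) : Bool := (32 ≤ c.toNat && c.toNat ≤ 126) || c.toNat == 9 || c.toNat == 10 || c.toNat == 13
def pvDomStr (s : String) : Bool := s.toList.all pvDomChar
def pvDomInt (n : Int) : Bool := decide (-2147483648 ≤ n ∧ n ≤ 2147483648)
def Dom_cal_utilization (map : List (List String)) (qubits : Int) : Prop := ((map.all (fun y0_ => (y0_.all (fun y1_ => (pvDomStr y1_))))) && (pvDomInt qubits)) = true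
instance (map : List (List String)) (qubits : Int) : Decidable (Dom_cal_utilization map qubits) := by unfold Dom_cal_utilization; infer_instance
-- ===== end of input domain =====

-- B replaces A's index-stepping greedy XX scan by a run-length (groupby) pass adding
-- 2*(run//2) per maximal X-run, and the Z while-loop by a direct count; objective: simpler.

-- ===== PORT A =====
-- inner while loop of A's first for-loop (end starts at 1; steps by 2 on an XX pair)
-- out-of-range indexing is a Python IndexError; excluded by Pre_, so pyGet? options compared here
def aXWhile (row : List String) (w : Nat) (end_ : Nat) (red : Int) : Int :=
  if end_ < w then
    if PySem.List.pyGet? row ((end_ : Int) - 1) == PySem.List.pyGet? row (end_ : Int)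
       && PySem.List.pyGet? row (end_ : Int) == some "X" then
      aXWhile row w (end_ + 2) (red + 2)
    else
      aXWhile row w (end_ + 1) red
  else red
termination_by w - end_
decreasing_by all_goals omega

-- inner while loop of A's second for-loop
def aZWhile (row : List String) (w : Nat) (end_ : Nat) (red : Int) : Int :=
  if end_ < w then
    if PySem.List.pyGet? row (end_ : Int) == some "Z" then
      aZWhile row w (end_ + 1) (red + 1)
    else
      aZWhile row w (end_ + 1) red
  else red
termination_by w - end_
decreasing_by all_goals omega

def cal_utilization (map : List (List String)) (qubits : Int) : Int :=
  let w := (map.headD []).length   -- len(map[0]); map empty is an IndexError, excluded by Pre_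
  let red1 := (PySem.List.pyRange 0 qubits 1).foldl
    (fun red i => aXWhile ((PySem.List.pyGet? map (i * 2)).getD []) w 1 red) 0
  (PySem.List.pyRange 0 (qubits * 2 - 1) 1).foldl
    (fun red i => aZWhile ((PySem.List.pyGet? map i).getD []) w 0 red) red1

-- ===== PORT B =====
-- run // 2 of Source B: run ≥ 0 so Python's floor division is PySem.Int.floordiv
-- groupby over the row: one recursive pass per maximal run, adding 2*(run//2) for X-runs
def xPairs : List String → Int
  | [] => 0
  | c :: cs =>
      (if c == "X" then
        2 * PySem.Int.floordiv (((cs.takeWhile (· == c)).length : Int) + 1) 2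
       else 0)
      + xPairs (cs.dropWhile (· == c))
termination_by l => l.length
decreasing_by
  simp only [List.length_cons]
  exact Nat.lt_succ_of_le (cs.length_dropWhile_le _)

def cal_utilization_alt (map : List (List String)) (qubits : Int) : Int :=
  if qubits ≤ 0 then 0
  else
    let w := (map.headD []).length
    if w = 0 then 0
    else
      -- map[i*2][:w] is List.take w (w ≥ 0); missing rows are outside Pre_
      let red1 := (PySem.List.pyRange 0 qubits 1).foldl
        (fun red i => red + xPairs (((PySem.List.pyGet? map (i * 2)).getD []).take w)) 0
      red1 + (PySem.List.pyRange 0 (2 * qubits - 1) 1).foldl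
        (fun s i => s + ((((PySem.List.pyGet? map i).getD []).take w).countP (· == "Z") : Int)) 0

-- ===== PRECONDITION & SPEC =====
-- Pre_ = exactly the inputs where A returns: A raises IndexError iff qubits > 0 and
-- (map is empty, or map[0] is nonempty and some row among the first 2*qubits-1 is
-- missing or shorter than len(map[0])).
def Pre_cal_utilization (map : List (List String)) (qubits : Int) : Prop :=
  0 < qubits →
    map ≠ [] ∧
    (0 < (map.headD []).length →
      (2 * qubits - 1).toNat ≤ map.length ∧
      ∀ row ∈ map.take (2 * qubits - 1).toNat, (map.headD []).length ≤ row.length)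
instance (map : List (List String)) (qubits : Int) : Decidable (Pre_cal_utilization map qubits) := by
  unfold Pre_cal_utilization; infer_instance

def pvWitness_cal_utilization : List (List String) × Int :=
  ([["X", "X"], ["Z", "_"], ["_", "_"]], 1)

def Spec_cal_utilization (map : List (List String)) (qubits : Int) (out : Int) : Prop := out = cal_utilization_alt map qubits
instance (map : List (List String)) (qubits : Int) (out : Int) : Decidable (Spec_cal_utilization map qubits out) := by unfold Spec_cal_utilization; infer_instance

-- ===== CLAIM (what is proved, stated in full; the proofs are below) =====
def Claim_equal_cal_utilization : Prop := ∀ (map : List (List String)) (qubits : Int), Dom_cal_utilization map qubits → Pre_cal_utilization map qubits → Spec_cal_utilization map qubits (cal_utilization map qubits)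

-- ===== LEMMAS AND PROOFS =====

-- intermediate characterisation of A's greedy XX scan, as a scan over the list
def scanX : List String → Int
  | a :: b :: rest => if a == b && b == "X" then 2 + scanX rest else scanX (b :: rest)
  | _ => 0

theorem scanX_short (l : List String) (h : l.length ≤ 1) : scanX l = 0 := by
  match l, h with
  | [], _ => rfl
  | [a], _ => rfl

-- A's Z while-loop counts "Z" in the first w cells
theorem aZWhile_eq (row : List String) (w : Nat) (hw : w ≤ row.length) :
    ∀ e red, aZWhile row w e red = red + (((row.take w).drop e).countP (· == "Z") : Int) := by
  intro e red
  by_cases h : e < w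
  · have hlt : e < row.length := lt_of_lt_of_le h hw
    rw [aZWhile]
    have hget : PySem.List.pyGet? row (e : Int) = some row[e] :=
      PySem.List.pyGet?_ofNat row e hlt
    have hdrop : (row.take w).drop e = row[e] :: (row.take w).drop (e + 1) := by
      rw [List.drop_eq_getElem_cons (by simp; omega)]
      congr 1
      simp [List.getElem_take]
    have ih := aZWhile_eq row w hw (e + 1)
    simp only [h, if_true, hget, hdrop]
    by_cases hz : row[e] = "Z" <;> simp [hz, ih] <;> omega
  · rw [aZWhile, if_neg h]
    have : (row.take w).drop e = [] := by
      apply List.drop_eq_nil_of_le; simp; omega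
    simp [this]
termination_by e => w - e
decreasing_by all_goals omega

-- A's X while-loop is the pair scan over the first w cells
theorem aXWhile_eq (row : List String) (w : Nat) (hw : w ≤ row.length) :
    ∀ e red, 1 ≤ e → aXWhile row w e red = red + scanX ((row.take w).drop (e - 1)) := by
  intro e red he
  by_cases h : e < w
  · have hlt : e < row.length := lt_of_lt_of_le h hw
    have hlt' : e - 1 < row.length := by omega
    rw [aXWhile]
    have hg1 : PySem.List.pyGet? row ((e : Int) - 1) = some row[e - 1] := by
      have : ((e : Int) - 1) = ((e - 1 : Nat) : Int) := by omega
      rw [this]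
      exact PySem.List.pyGet?_ofNat row (e - 1) hlt'
    have hg2 : PySem.List.pyGet? row (e : Int) = some row[e] :=
      PySem.List.pyGet?_ofNat row e hlt
    have hd1 : (row.take w).drop (e - 1) = row[e - 1] :: (row.take w).drop e := by
      have he1 : e - 1 + 1 = e := by omega
      rw [List.drop_eq_getElem_cons (by simp; omega), he1]
      congr 1
      simp [List.getElem_take]
    have hd2 : (row.take w).drop e = row[e] :: (row.take w).drop (e + 1) := by
      rw [List.drop_eq_getElem_cons (by simp; omega)]
      congr 1
      simp [List.getElem_take]
    simp only [h, if_true, hg1, hg2]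
    by_cases hc : (row[e - 1] == row[e] && row[e] == "X") = true
    · have ih := aXWhile_eq row w hw (e + 2) (red + 2) (by omega)
      simp only [Option.some_beq_some] at *
      rw [if_pos (by simpa using hc), ih, hd1, hd2]
      rw [scanX]
      simp only [hc, if_true]
      have : e + 2 - 1 = e + 1 := by omega
      rw [this]; ring
    · have ih := aXWhile_eq row w hw (e + 1) red (by omega)
      simp only [Option.some_beq_some] at *
      rw [if_neg (by simpa using hc), ih, hd1, hd2]
      rw [scanX]
      simp only [hc]
      rw [← hd2]
      simp
  · rw [aXWhile, if_neg h]
    have : ((row.take w).drop (e - 1)).length ≤ 1 := by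
      simp; omega
    rw [scanX_short _ this]; ring
termination_by e => w - e
decreasing_by all_goals omega

-- scanX swallows a leading maximal X-run, contributing 2 per disjoint adjacent pair
theorem scanX_run (cs : List String) :
    scanX cs = 2 * (((cs.takeWhile (· == "X")).length : Int) / 2)
      + scanX (cs.dropWhile (· == "X")) := by
  match cs with
  | [] => simp [scanX]
  | [a] =>
      by_cases ha : a = "X"
      · subst ha; simp [scanX, List.takeWhile, List.dropWhile]
      · have h : (a == "X") = false := by simp [ha]
        simp [scanX, List.takeWhile, List.dropWhile, h]
  | a :: b :: rest =>
      by_cases ha : a = "X"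
      · by_cases hb : b = "X"
        · have ih := scanX_run rest
          subst ha hb
          rw [scanX]
          simp only [List.takeWhile, List.dropWhile, beq_self_eq_true]
          simp only [List.length_cons]
          rw [ih]
          push_cast
          have h2 : ((((rest.takeWhile (· == "X")).length : Int) + 1 + 1) / 2)
              = ((rest.takeWhile (· == "X")).length : Int) / 2 + 1 := by omega
          rw [h2]
          simp
          ring
        · subst ha
          rw [scanX]
          have hbf : (b == "X") = false := by simp [hb]
          have hcond : (("X" : String) == b && b == "X") = false := by
            simp [hbf]
          rw [hcond]
          simp only [Bool.false_eq_true, if_false, List.takeWhile, List.dropWhile,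
            beq_self_eq_true, hbf]
          norm_num
      · rw [scanX]
        have hcond : (a == b && b == "X") = false := by
          by_cases hab : a = b
          · subst hab; simp [ha]
          · simp [hab]
        have haf : (a == "X") = false := by simp [ha]
        rw [hcond]
        simp only [Bool.false_eq_true, if_false, List.takeWhile, List.dropWhile, haf]
        norm_num
        conv_rhs => rw [scanX]
        rw [hcond]
        simp

-- dropping a leading run of a non-X value does not change the scan
theorem scanX_drop_nonX (c : String) (hc : c ≠ "X") :
    ∀ cs, scanX (c :: cs) = scanX (cs.dropWhile (· == c)) := by
  intro cs
  induction cs with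
  | nil => simp [scanX]
  | cons b rest ih =>
      rw [scanX]
      have hcond : (c == b && b == "X") = false := by
        by_cases hcb : c = b
        · subst hcb; simp [hc]
        · simp [hcb]
      rw [hcond]
      simp only [Bool.false_eq_true, if_false]
      by_cases hbc : b = c
      · subst hbc
        rw [ih]
        simp [List.dropWhile]
      · have : (b == c) = false := by simp [hbc]
        simp [List.dropWhile, this]

theorem floordiv_nonneg_eq (n : Int) (_hn : 0 ≤ n) : PySem.Int.floordiv n 2 = n / 2 := by
  simp [PySem.Int.floordiv, Int.fdiv_eq_ediv]

-- the greedy pair scan equals the per-run 2*(len/2) sum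
theorem scanX_eq_xPairs : ∀ l : List String, scanX l = xPairs l := by
  intro l
  match l with
  | [] => simp [scanX, xPairs]
  | c :: cs =>
      have hlen : (cs.dropWhile (· == c)).length < (c :: cs).length :=
        Nat.lt_succ_of_le (cs.length_dropWhile_le _)
      have ih := scanX_eq_xPairs (cs.dropWhile (· == c))
      rw [xPairs]
      by_cases hc : c = "X"
      · subst hc
        have := scanX_run ("X" :: cs)
        simp only [List.takeWhile, List.dropWhile, beq_self_eq_true,
          List.length_cons] at this
        rw [this, ih, floordiv_nonneg_eq _ (by positivity)]
        simp only [beq_self_eq_true, if_true]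
        push_cast
        ring
      · rw [scanX_drop_nonX c hc cs, ih]
        have : (c == "X") = false := by simp [hc]
        simp [this]
termination_by l => l.length
decreasing_by
  simp only [List.length_cons]
  exact Nat.lt_succ_of_le (List.length_dropWhile_le _ _)

-- ===== VERDICT (by name: the statement is the Claim_ definition above) =====
theorem cal_utilization_spec : Claim_equal_cal_utilization := by
  intro map qubits _hdom hpre
  simp only [Spec_cal_utilization, cal_utilization, cal_utilization_alt]
  by_cases hq : qubits ≤ 0
  · rw [if_pos hq]
    rw [PySem.List.pyRange_one_eq_nil (by omega), PySem.List.pyRange_one_eq_nil (by omega)]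
    rfl
  · rw [if_neg hq]
    obtain ⟨hne, hrows⟩ := hpre (by omega)
    set w := (map.headD []).length with hw
    by_cases hw0 : w = 0
    · rw [if_pos hw0]
      simp only [hw0]
      have h1 : ∀ red (i : Int), aXWhile ((PySem.List.pyGet? map (i * 2)).getD []) 0 1 red = red := by
        intro red i; rw [aXWhile]; simp
      have h2 : ∀ red (i : Int), aZWhile ((PySem.List.pyGet? map i).getD []) 0 0 red = red := by
        intro red i; rw [aZWhile]; simp
      have cf : ∀ (l : List Int) (a : Int), List.foldl (fun red (_ : Int) => red) a l = a := by
        intro l a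
        induction l generalizing a with
        | nil => rfl
        | cons b t ih => exact ih a
      rw [PySem.List.foldl_congr_mem _
            (fun red i => aZWhile ((PySem.List.pyGet? map i).getD []) 0 0 red)
            (fun (red : Int) (_ : Int) => red) _
            (by intro acc x hx; exact h2 acc x)]
      rw [PySem.List.foldl_congr_mem _
            (fun red i => aXWhile ((PySem.List.pyGet? map (i * 2)).getD []) 0 1 red)
            (fun (red : Int) (_ : Int) => red) _
            (by intro acc x hx; exact h1 acc x)]
      rw [cf, cf]
    · rw [if_neg hw0]
      obtain ⟨hlen, htake⟩ := hrows (by omega)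
      -- every row index 0 ≤ i < 2*qubits-1 gives a real row of length ≥ w
      have hrow : ∀ i : Int, 0 ≤ i → i < 2 * qubits - 1 →
          PySem.List.pyGet? map i = some (map.getD i.toNat []) ∧
          w ≤ (map.getD i.toNat []).length := by
        intro i h0 h1
        have hi : i.toNat < map.length := by omega
        have hg : map.getD i.toNat [] = map[i.toNat]'hi := List.getD_eq_getElem map [] hi
        constructor
        · rw [hg]
          exact PySem.List.pyGet?_eq_some_getElem map h0 (by omega)
        · rw [hg]
          apply htake
          have hlt : i.toNat < (2 * qubits - 1).toNat := by omega
          have hgt : (map.take (2 * qubits - 1).toNat)[i.toNat]'(by simp; omega) = map[i.toNat]'hi := by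
            simp [List.getElem_take]
          rw [← hgt]
          exact List.getElem_mem _
      -- first loop: A's while-scan per row = B's run-length pass per row
      have crw1 : ∀ init : Int,
          (PySem.List.pyRange 0 qubits 1).foldl
            (fun red i => aXWhile ((PySem.List.pyGet? map (i * 2)).getD []) w 1 red) init
          = (PySem.List.pyRange 0 qubits 1).foldl
            (fun red i => red + xPairs (((PySem.List.pyGet? map (i * 2)).getD []).take w)) init := by
        intro init
        apply PySem.List.foldl_congr_mem
        intro acc i hi
        rw [PySem.List.mem_pyRange_one] at hi
        obtain ⟨hrg, hrl⟩ := hrow (i * 2) (by omega) (by omega)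
        rw [hrg]
        simp only [Option.getD_some]
        rw [aXWhile_eq _ w hrl 1 acc (le_refl 1)]
        simp [scanX_eq_xPairs]
      -- second loop: A's while-count per row = B's countP per row
      have crw2 : ∀ init : Int,
          (PySem.List.pyRange 0 (qubits * 2 - 1) 1).foldl
            (fun red i => aZWhile ((PySem.List.pyGet? map i).getD []) w 0 red) init
          = (PySem.List.pyRange 0 (qubits * 2 - 1) 1).foldl
            (fun red i => red + ((((PySem.List.pyGet? map i).getD []).take w).countP (· == "Z") : Int)) init := by
        intro init
        apply PySem.List.foldl_congr_mem
        intro acc i hi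
        rw [PySem.List.mem_pyRange_one] at hi
        obtain ⟨hrg, hrl⟩ := hrow i (by omega) (by omega)
        rw [hrg]
        simp only [Option.getD_some]
        rw [aZWhile_eq _ w hrl 0 acc]
        simp
      rw [crw1, crw2]
      have e1 : qubits * 2 - 1 = 2 * qubits - 1 := by ring
      rw [e1]
      simp only [PySem.List.foldl_add]
      ring
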